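-- pv_equiv track=rewrite | github.com/Thyge1232/AktieScreener | utils/helper_functions.py | get_market_for_ticker
-- ===== SOURCE A (Python) =====
-- def get_market_for_ticker(ticker: str) -> str:
--     """Returnerer markedet for en given ticker"""
--     if any(ticker.endswith(ext) for ext in [".AS", ".CO", ".DE", ".PA", ".ST", ".SW", ".HE", ".L", ".N"]):
--         return "EU"
--     elif any(ticker.endswith(ext) for ext in [".TO", ".V"]):
--         return "CA"
--     elif any(ticker.endswith(ext) for ext in [".HK"]):
--         return "HK"
--     else:
--         return "US"
-- ===== SOURCE B (Python) =====
-- _REGION = {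
--     ".AS": "EU", ".CO": "EU", ".DE": "EU", ".PA": "EU", ".ST": "EU",
--     ".SW": "EU", ".HE": "EU", ".TO": "CA", ".HK": "HK",
--     ".L": "EU", ".N": "EU", ".V": "CA",
-- }
--
-- def get_market_for_ticker(ticker: str) -> str:
--     """Returnerer markedet for en given ticker"""
--     # The suffix that decides the market is the last 3 or last 2 characters;
--     # one table lookup for each replaces the three endswith scans.
--     return _REGION.get(ticker[-3:]) or _REGION.get(ticker[-2:]) or "US"
-- ===== Notes on version B (the rewrite author's own statement) =====
-- stated objective: simpler
-- what changed: Replaces the three any()-scans over suffix lists (12 endswith calls) with one constant dict keyed by the dotted suffix, read off as the ticker's last 3 and last 2 characters: two lookups instead of up to 12 string scans.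
import Mathlib
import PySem

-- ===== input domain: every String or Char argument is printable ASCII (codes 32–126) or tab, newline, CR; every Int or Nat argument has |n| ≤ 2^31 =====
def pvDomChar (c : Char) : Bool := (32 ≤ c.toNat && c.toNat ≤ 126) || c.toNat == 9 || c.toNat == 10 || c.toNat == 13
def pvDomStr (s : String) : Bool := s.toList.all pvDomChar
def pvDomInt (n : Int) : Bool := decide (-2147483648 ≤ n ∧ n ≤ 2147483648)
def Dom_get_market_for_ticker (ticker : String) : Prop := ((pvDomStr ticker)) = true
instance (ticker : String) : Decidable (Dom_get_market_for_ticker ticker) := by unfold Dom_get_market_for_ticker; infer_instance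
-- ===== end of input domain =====

set_option maxHeartbeats 2000000


-- B replaces A's three any()/endswith scans with one constant suffix→region table
-- consulted at the ticker's last 3 and last 2 characters (objective: simpler).

-- ===== PORT A =====
def get_market_for_ticker (ticker : String) : String :=
  if ([".AS", ".CO", ".DE", ".PA", ".ST", ".SW", ".HE", ".L", ".N"].any
      (fun ext => PySem.Str.endswith ticker ext)) then "EU"
  else if ([".TO", ".V"].any (fun ext => PySem.Str.endswith ticker ext)) then "CA"
  else if ([".HK"].any (fun ext => PySem.Str.endswith ticker ext)) then "HK"
  else "US"

-- ===== PORT B =====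
-- the module-level _REGION dict of Source B
def pvRegionMap : PySem.Dict String String :=
  PySem.Dict.ofList
  [(".AS","EU"),(".CO","EU"),(".DE","EU"),(".PA","EU"),(".ST","EU"),
   (".SW","EU"),(".HE","EU"),(".TO","CA"),(".HK","HK"),
   (".L","EU"),(".N","EU"),(".V","CA")]

-- `x or y` in Source B chooses the dict hit over the fallback; since dict values are
-- non-empty (truthy) strings this is exactly the Option match below.
def get_market_for_ticker_alt (ticker : String) : String :=
  match PySem.Dict.get? pvRegionMap (PySem.Str.slice ticker (some (-3)) none) with
  | some r => r
  | none =>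
    match PySem.Dict.get? pvRegionMap (PySem.Str.slice ticker (some (-2)) none) with
    | some r => r
    | none => "US"

-- ===== PRECONDITION & SPEC =====
def Spec_get_market_for_ticker (ticker : String) (out : String) : Prop := out = get_market_for_ticker_alt ticker
instance (ticker : String) (out : String) : Decidable (Spec_get_market_for_ticker ticker out) := by unfold Spec_get_market_for_ticker; infer_instance

-- ===== CLAIM (what is proved, stated in full; the proofs are below) =====
def Claim_equal_get_market_for_ticker : Prop := ∀ (ticker : String), Dom_get_market_for_ticker ticker → Spec_get_market_for_ticker ticker (get_market_for_ticker ticker)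

-- ===== LEMMAS AND PROOFS =====

lemma pvRegionMap_items : pvRegionMap.items =
    [(".AS","EU"),(".CO","EU"),(".DE","EU"),(".PA","EU"),(".ST","EU"),
     (".SW","EU"),(".HE","EU"),(".TO","CA"),(".HK","HK"),
     (".L","EU"),(".N","EU"),(".V","CA")] := by decide

-- closed-form characterisation of the dict lookup
lemma getRegion (k : String) : pvRegionMap.get? k =
    (if k = ".AS" then some "EU" else if k = ".CO" then some "EU" else if k = ".DE" then some "EU"
     else if k = ".PA" then some "EU" else if k = ".ST" then some "EU" else if k = ".SW" then some "EU"
     else if k = ".HE" then some "EU" else if k = ".TO" then some "CA" else if k = ".HK" then some "HK"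
     else if k = ".L" then some "EU" else if k = ".N" then some "EU" else if k = ".V" then some "CA"
     else none) := by
  split_ifs with h1 h2 h3 h4 h5 h6 h7 h8 h9 h10 h11 h12
  · subst h1; decide
  · subst h2; decide
  · subst h3; decide
  · subst h4; decide
  · subst h5; decide
  · subst h6; decide
  · subst h7; decide
  · subst h8; decide
  · subst h9; decide
  · subst h10; decide
  · subst h11; decide
  · subst h12; decide
  · simp only [PySem.Dict.get?, pvRegionMap_items, Option.map_eq_none_iff, List.find?_eq_none]
    intro x hx
    simp only [List.mem_cons, List.not_mem_nil, or_false] at hx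
    rcases hx with h|h|h|h|h|h|h|h|h|h|h|h <;> subst h <;> simp [beq_iff_eq] <;>
      first
      | exact fun h => h1 h.symm | exact fun h => h2 h.symm | exact fun h => h3 h.symm
      | exact fun h => h4 h.symm | exact fun h => h5 h.symm | exact fun h => h6 h.symm
      | exact fun h => h7 h.symm | exact fun h => h8 h.symm | exact fun h => h9 h.symm
      | exact fun h => h10 h.symm | exact fun h => h11 h.symm | exact fun h => h12 h.symm

lemma mo (o : Option String) (d : String) :
    (match o with | some r => r | none => d) = o.getD d := by cases o <;> rfl

lemma slice_list (t : String) (k : Nat) (hk : 0 < k) :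
    (PySem.Str.slice t (some (-(k : Int))) none).toList
      = List.drop (t.toList.length - k) t.toList := by
  rw [PySem.Str.toList_slice, PySem.Chars.slice_eq_listSlice,
    PySem.List.slice_from_neg_natCast t.toList k hk]

-- `t.endswith(p)` is `t[-len(p):] == p`
lemma esw (t p : String) (k : Nat) (hk : 0 < k) (hp : p.toList.length = k) :
    PySem.Str.endswith t p = (PySem.Str.slice t (some (-(k : Int))) none == p) := by
  rw [Bool.eq_iff_iff]
  rw [PySem.Str.endswith_eq, PySem.Chars.endswith_iff, beq_iff_eq, List.suffix_iff_eq_drop]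
  have hs := slice_list t k hk
  constructor
  · intro h
    apply String.ext
    rw [hs, hp] at *
    exact h.symm
  · intro h
    rw [hp]
    have := congrArg String.toList h
    rw [hs] at this
    exact this.symm

lemma esw3 (t p : String) (hp : p.toList.length = 3) :
    PySem.Str.endswith t p = (PySem.Str.slice t (some (-3)) none == p) := by
  simpa using esw t p 3 (by norm_num) hp

lemma esw2 (t p : String) (hp : p.toList.length = 2) :
    PySem.Str.endswith t p = (PySem.Str.slice t (some (-2)) none == p) := by
  simpa using esw t p 2 (by norm_num) hp

lemma seq (x p : String) : (x = p) = (x.toList = p.toList) := by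
  apply propext
  exact ⟨fun h => by rw [h], fun h => String.ext h⟩

-- ===== VERDICT (by name: the statement is the Claim_ definition above) =====
theorem get_market_for_ticker_spec : Claim_equal_get_market_for_ticker := by
  intro t _
  unfold Spec_get_market_for_ticker
  have h3 : (PySem.Str.slice t (some (-3)) none).toList
      = List.drop (t.toList.length - 3) t.toList := by
    simpa using slice_list t 3 (by norm_num)
  have h2 : (PySem.Str.slice t (some (-2)) none).toList
      = List.drop (t.toList.length - 2) t.toList := by
    simpa using slice_list t 2 (by norm_num)
  rw [get_market_for_ticker, get_market_for_ticker_alt]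
  simp only [mo]
  rw [getRegion, getRegion]
  simp only [List.any_cons, List.any_nil, Bool.or_false]
  rw [esw3 t ".AS" (by decide), esw3 t ".CO" (by decide), esw3 t ".DE" (by decide),
     esw3 t ".PA" (by decide), esw3 t ".ST" (by decide), esw3 t ".SW" (by decide),
     esw3 t ".HE" (by decide), esw2 t ".L" (by decide), esw2 t ".N" (by decide),
     esw3 t ".TO" (by decide), esw2 t ".V" (by decide), esw3 t ".HK" (by decide)]
  simp only [Bool.or_eq_true, beq_iff_eq]
  simp only [seq, h3, h2]
  simp only [show (".AS":String).toList = ['.','A','S'] from rfl,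
    show (".CO":String).toList = ['.','C','O'] from rfl,
    show (".DE":String).toList = ['.','D','E'] from rfl,
    show (".PA":String).toList = ['.','P','A'] from rfl,
    show (".ST":String).toList = ['.','S','T'] from rfl,
    show (".SW":String).toList = ['.','S','W'] from rfl,
    show (".HE":String).toList = ['.','H','E'] from rfl,
    show (".TO":String).toList = ['.','T','O'] from rfl,
    show (".HK":String).toList = ['.','H','K'] from rfl,
    show (".L":String).toList = ['.','L'] from rfl,
    show (".N":String).toList = ['.','N'] from rfl,
    show (".V":String).toList = ['.','V'] from rfl]
  generalize hu : List.drop (t.toList.length - 3) t.toList = u at *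
  generalize hv : List.drop (t.toList.length - 2) t.toList = v at *
  have hlen : u.length ≤ 3 := by
    rw [← hu, List.length_drop]; omega
  have hvu : v = u.drop (u.length - 2) := by
    rw [← hu, ← hv, List.drop_drop, List.length_drop]
    congr 1
    omega
  subst hvu
  rcases u with _|⟨a,_|⟨b,_|⟨c,_|⟨d,r⟩⟩⟩⟩
  · simp
  · simp
  · simp only [List.length_cons, List.length_nil, List.drop]
    by_cases h1 : a = '.' ∧ b = 'L'
    · obtain ⟨rfl, rfl⟩ := h1; simp
    by_cases h2 : a = '.' ∧ b = 'N'
    · obtain ⟨rfl, rfl⟩ := h2; simp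
    by_cases h3 : a = '.' ∧ b = 'V'
    · obtain ⟨rfl, rfl⟩ := h3; simp
    simp [h1, h2, h3]
  · simp only [List.length_cons, List.length_nil, List.drop]
    by_cases h1 : a = '.' ∧ b = 'A' ∧ c = 'S'
    · obtain ⟨rfl, rfl, rfl⟩ := h1; simp
    by_cases h2 : a = '.' ∧ b = 'C' ∧ c = 'O'
    · obtain ⟨rfl, rfl, rfl⟩ := h2; simp
    by_cases h3 : a = '.' ∧ b = 'D' ∧ c = 'E'
    · obtain ⟨rfl, rfl, rfl⟩ := h3; simp
    by_cases h4 : a = '.' ∧ b = 'P' ∧ c = 'A'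
    · obtain ⟨rfl, rfl, rfl⟩ := h4; simp
    by_cases h5 : a = '.' ∧ b = 'S' ∧ c = 'T'
    · obtain ⟨rfl, rfl, rfl⟩ := h5; simp
    by_cases h6 : a = '.' ∧ b = 'S' ∧ c = 'W'
    · obtain ⟨rfl, rfl, rfl⟩ := h6; simp
    by_cases h7 : a = '.' ∧ b = 'H' ∧ c = 'E'
    · obtain ⟨rfl, rfl, rfl⟩ := h7; simp
    by_cases h8 : b = '.' ∧ c = 'L'
    · obtain ⟨rfl, rfl⟩ := h8; simp
    by_cases h9 : b = '.' ∧ c = 'N'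
    · obtain ⟨rfl, rfl⟩ := h9; simp
    by_cases h10 : a = '.' ∧ b = 'T' ∧ c = 'O'
    · obtain ⟨rfl, rfl, rfl⟩ := h10; simp
    by_cases h11 : b = '.' ∧ c = 'V'
    · obtain ⟨rfl, rfl⟩ := h11; simp
    by_cases h12 : a = '.' ∧ b = 'H' ∧ c = 'K'
    · obtain ⟨rfl, rfl, rfl⟩ := h12; simp
    simp [h1, h2, h3, h4, h5, h6, h7, h8, h9, h10, h11, h12]
  · exfalso; simp at hlen; omega
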